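-- pv_equiv track=rewrite | github.com/sarishtshreshth0/plag_extract | Project_CodeNet_Python800/p03212/s443192771.py | dfs
-- ===== SOURCE A (Python) =====
-- from collections import deque
--
-- def dfs(n):
--     stack = deque(['3','5','7'])
--     ansl = []
--     while stack:
--         num_s = stack.pop()
--         num = int(num_s)
--         if num > n: continue
--         if '7' in num_s and '5' in num_s and '3' in num_s:
--             ansl.append(num)
--         stack.append(num_s+'7')
--         stack.append(num_s+'5')
--         stack.append(num_s+'3')
--     return ansl
-- ===== SOURCE B (Python) =====
-- def dfs(n):
--     # Pure-integer preorder DFS: carry the value and three digit-presence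
--     # flags instead of building and re-parsing digit strings.
--     def rec(v, h3, h5, h7):
--         if v > n:
--             return []
--         cur = [v] if h3 and h5 and h7 else []
--         return (cur
--                 + rec(10 * v + 3, True, h5, h7)
--                 + rec(10 * v + 5, h3, True, h7)
--                 + rec(10 * v + 7, h3, h5, True))
--     return (rec(7, False, False, True)
--             + rec(5, False, True, False)
--             + rec(3, True, False, False))
-- ===== Notes on version B (the rewrite author's own statement) =====
-- stated objective: alternative
-- what changed: Replaces the explicit right-popped string deque (build digit strings, re-parse each with int(), substring-test for '3'/'5'/'7') by a pure-integer preorder recursion that carries the value and three digit-presence boolean flags, so no strings are built or parsed at all.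
import Mathlib
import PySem

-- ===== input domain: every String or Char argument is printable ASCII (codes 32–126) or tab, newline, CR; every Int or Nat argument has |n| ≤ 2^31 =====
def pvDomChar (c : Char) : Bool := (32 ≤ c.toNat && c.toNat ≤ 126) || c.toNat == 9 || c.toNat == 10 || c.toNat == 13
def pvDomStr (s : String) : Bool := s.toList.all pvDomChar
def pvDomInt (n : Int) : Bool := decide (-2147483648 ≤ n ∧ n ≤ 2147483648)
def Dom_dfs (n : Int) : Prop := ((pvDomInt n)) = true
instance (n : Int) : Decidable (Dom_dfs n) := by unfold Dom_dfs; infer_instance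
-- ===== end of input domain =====

-- B replaces A's explicit string stack by a pure-integer preorder recursion
-- carrying digit-presence flags (alternative decomposition; return value only).


-- ===== PORT A =====
-- hand port of Python `int(num_s)`: exact on the non-empty decimal-digit
-- strings this program builds (Python's int() also accepts sign/whitespace/
-- underscores, which never occur here)
def dfsDv (s : String) : Nat := s.toList.foldl (fun a c => 10 * a + (c.toNat - 48)) 0

-- termination helper for the two value recursions below (cited by decreasing_by)
lemma pvMeasureDec (n : Int) (u d : Nat) (hd : 0 < d) (h : ¬((u : Int) > n)) :
    (n + 1 - ((10 * u + d : Nat) : Int)).toNat < (n + 1 - (u : Int)).toNat := by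
  push_cast
  omega

-- weight of a node = size of its explored subtree; used only as the
-- termination measure of the stack loop below
def dfsW (n : Int) (u : Nat) : Nat :=
  if (u : Int) > n then 1
  else 1 + dfsW n (10 * u + 3) + dfsW n (10 * u + 5) + dfsW n (10 * u + 7)
termination_by (n + 1 - (u : Int)).toNat
decreasing_by
  · exact pvMeasureDec n u 3 (by norm_num) (by assumption)
  · exact pvMeasureDec n u 5 (by norm_num) (by assumption)
  · exact pvMeasureDec n u 7 (by norm_num) (by assumption)

lemma dfsW_pos (n : Int) (u : Nat) : 1 ≤ dfsW n u := by
  rw [dfsW]; split <;> omega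

lemma dfsDv_append (s : String) (t : String) (c : Char) (ht : t.toList = [c]) :
    dfsDv (s ++ t) = 10 * dfsDv s + (c.toNat - 48) := by
  simp [dfsDv, String.toList_append, ht, List.foldl_append]

-- termination helpers for the stack loop (cited by decreasing_by)
lemma pvLoopDec1 (n : Int) (num_s : String) (rest : List String) :
    (rest.map (fun s => dfsW n (dfsDv s))).sum
      < ((num_s :: rest).map (fun s => dfsW n (dfsDv s))).sum := by
  have := dfsW_pos n (dfsDv num_s)
  simp only [List.map_cons, List.sum_cons]
  omega

lemma pvLoopDec2 (n : Int) (num_s : String) (rest : List String)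
    (h : ¬((dfsDv num_s : Int) > n)) :
    ((((num_s ++ "3") :: (num_s ++ "5") :: (num_s ++ "7") :: rest)).map
        (fun s => dfsW n (dfsDv s))).sum
      < ((num_s :: rest).map (fun s => dfsW n (dfsDv s))).sum := by
  simp only [List.map_cons, List.sum_cons,
    dfsDv_append num_s "3" '3' (by decide),
    dfsDv_append num_s "5" '5' (by decide),
    dfsDv_append num_s "7" '7' (by decide),
    show '3'.toNat - 48 = 3 from by decide,
    show '5'.toNat - 48 = 5 from by decide,
    show '7'.toNat - 48 = 7 from by decide]
  have h1 : dfsW n (dfsDv num_s)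
      = 1 + dfsW n (10 * dfsDv num_s + 3) + dfsW n (10 * dfsDv num_s + 5)
          + dfsW n (10 * dfsDv num_s + 7) := by
    rw [dfsW]
    rw [if_neg h]
  omega

-- the deque, popped and pushed at the right, is ported as a list whose HEAD
-- is the right end of the deque
def dfsLoop (n : Int) (stack : List String) (ansl : List Int) : List Int :=
  match stack with
  | [] => ansl
  | num_s :: rest =>
    let num : Int := (dfsDv num_s : Int)
    if num > n then dfsLoop n rest ansl
    else
      dfsLoop n ((num_s ++ "3") :: (num_s ++ "5") :: (num_s ++ "7") :: rest)
        (if PySem.Str.isIn "7" num_s && PySem.Str.isIn "5" num_s && PySem.Str.isIn "3" num_s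
         then ansl ++ [num] else ansl)
termination_by (stack.map (fun s => dfsW n (dfsDv s))).sum
decreasing_by
  · exact pvLoopDec1 n num_s rest
  · exact pvLoopDec2 n num_s rest (by assumption)

def dfs (n : Int) : List Int := dfsLoop n ["7", "5", "3"] []

-- ===== PORT B =====
def dfsRec (n : Int) (v : Nat) (h3 h5 h7 : Bool) : List Int :=
  if (v : Int) > n then []
  else
    (if h3 && h5 && h7 then [(v : Int)] else [])
      ++ dfsRec n (10 * v + 3) true h5 h7
      ++ dfsRec n (10 * v + 5) h3 true h7
      ++ dfsRec n (10 * v + 7) h3 h5 true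
termination_by (n + 1 - (v : Int)).toNat
decreasing_by
  · exact pvMeasureDec n v 3 (by norm_num) (by assumption)
  · exact pvMeasureDec n v 5 (by norm_num) (by assumption)
  · exact pvMeasureDec n v 7 (by norm_num) (by assumption)

def dfs_alt (n : Int) : List Int :=
  dfsRec n 7 false false true ++ dfsRec n 5 false true false ++ dfsRec n 3 true false false

-- ===== PRECONDITION & SPEC =====
def Spec_dfs (n : Int) (out : List Int) : Prop := out = dfs_alt n
instance (n : Int) (out : List Int) : Decidable (Spec_dfs n out) := by unfold Spec_dfs; infer_instance

-- ===== CLAIM (what is proved, stated in full; the proofs are below) =====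
def Claim_equal_dfs : Prop := ∀ (n : Int), Dom_dfs n → Spec_dfs n (dfs n)

-- ===== LEMMAS AND PROOFS =====

lemma isIn_digit (t : String) (c : Char) (ht : t.toList = [c]) (s : String) :
    PySem.Str.isIn t s = decide (c ∈ s.toList) := by
  rcases h : PySem.Str.isIn t s with _ | _
  · have := (PySem.Str.isIn_iff_infix (sub := t) (s := s))
    rw [h] at this; simp [ht, List.singleton_infix_iff] at this
    simp [this]
  · have := (PySem.Str.isIn_iff_infix (sub := t) (s := s)).mp h
    rw [ht, List.singleton_infix_iff] at this
    simp [this]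

lemma dfsLoop_eq (n : Int) : ∀ (m : Nat) (stack : List String) (ansl : List Int),
    (stack.map (fun s => dfsW n (dfsDv s))).sum ≤ m →
    dfsLoop n stack ansl = ansl ++ (stack.map (fun s =>
      dfsRec n (dfsDv s) (decide ('3' ∈ s.toList)) (decide ('5' ∈ s.toList))
        (decide ('7' ∈ s.toList)))).flatten := by
  intro m
  induction m with
  | zero =>
    intro stack ansl h
    cases stack with
    | nil => simp [dfsLoop]
    | cons s rest =>
      exfalso; have := dfsW_pos n (dfsDv s); simp at h; omega
  | succ m ih =>
    intro stack ansl h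
    cases stack with
    | nil => simp [dfsLoop]
    | cons s rest =>
      simp only [List.map_cons, List.sum_cons] at h
      rw [dfsLoop]
      by_cases hgt : (dfsDv s : Int) > n
      · rw [if_pos hgt, ih rest ansl (by have := dfsW_pos n (dfsDv s); omega)]
        simp only [List.map_cons, List.flatten_cons]
        have hrec := dfsRec.eq_def n (dfsDv s) (decide ('3' ∈ s.toList))
          (decide ('5' ∈ s.toList)) (decide ('7' ∈ s.toList))
        rw [if_pos hgt] at hrec
        rw [hrec]
        simp
      · rw [if_neg hgt]
        have hW : dfsW n (dfsDv s)
            = 1 + dfsW n (10 * dfsDv s + 3) + dfsW n (10 * dfsDv s + 5)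
                + dfsW n (10 * dfsDv s + 7) := by
          rw [dfsW]; rw [if_neg hgt]
        have hsum : ((((s ++ "3") :: (s ++ "5") :: (s ++ "7") :: rest).map
            (fun s => dfsW n (dfsDv s))).sum) ≤ m := by
          simp only [List.map_cons, List.sum_cons,
            dfsDv_append s "3" '3' (by decide),
            dfsDv_append s "5" '5' (by decide),
            dfsDv_append s "7" '7' (by decide),
            show '3'.toNat - 48 = 3 from by decide,
            show '5'.toNat - 48 = 5 from by decide,
            show '7'.toNat - 48 = 7 from by decide]
          omega
        rw [ih _ _ hsum]
        simp only [List.map_cons, List.flatten_cons,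
          dfsDv_append s "3" '3' (by decide),
          dfsDv_append s "5" '5' (by decide),
          dfsDv_append s "7" '7' (by decide),
          show '3'.toNat - 48 = 3 from by decide,
          show '5'.toNat - 48 = 5 from by decide,
          show '7'.toNat - 48 = 7 from by decide,
          isIn_digit "3" '3' (by decide) s,
          isIn_digit "5" '5' (by decide) s,
          isIn_digit "7" '7' (by decide) s,
          String.toList_append]
        have t3 : ("3" : String).toList = ['3'] := by decide
        have t5 : ("5" : String).toList = ['5'] := by decide
        have t7 : ("7" : String).toList = ['7'] := by decide
        simp only [t3, t5, t7, List.mem_append, List.mem_singleton]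
        have hrec := dfsRec.eq_def n (dfsDv s) (decide ('3' ∈ s.toList))
          (decide ('5' ∈ s.toList)) (decide ('7' ∈ s.toList))
        rw [if_neg hgt] at hrec
        rw [hrec]
        cases h3 : decide ('3' ∈ s.toList) <;>
          cases h5 : decide ('5' ∈ s.toList) <;>
            cases h7 : decide ('7' ∈ s.toList) <;>
              simp [h3, h5, h7, List.append_assoc]
  
theorem dfs_spec : Claim_equal_dfs := by
  unfold Claim_equal_dfs
  intro n _
  unfold Spec_dfs
  rw [dfs, dfsLoop_eq n ((["7","5","3"].map (fun s => dfsW n (dfsDv s))).sum) _ _ le_rfl]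
  have d7 : dfsDv "7" = 7 := by decide
  have d5 : dfsDv "5" = 5 := by decide
  have d3 : dfsDv "3" = 3 := by decide
  simp only [List.map_cons, List.map_nil, List.flatten_cons, List.flatten_nil,
    d3, d5, d7, List.nil_append, List.append_nil]
  have m7 : (decide ('3' ∈ ("7":String).toList), decide ('5' ∈ ("7":String).toList),
      decide ('7' ∈ ("7":String).toList)) = (false, false, true) := by decide
  have m5 : (decide ('3' ∈ ("5":String).toList), decide ('5' ∈ ("5":String).toList),
      decide ('7' ∈ ("5":String).toList)) = (false, true, false) := by decide
  have m3 : (decide ('3' ∈ ("3":String).toList), decide ('5' ∈ ("3":String).toList),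
      decide ('7' ∈ ("3":String).toList)) = (true, false, false) := by decide
  simp only [Prod.mk.injEq] at m7 m5 m3
  rw [m7.1, m7.2.1, m7.2.2, m5.1, m5.2.1, m5.2.2, m3.1, m3.2.1, m3.2.2, dfs_alt]
  simp [List.append_assoc]
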